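-- pv_equiv track=rewrite | github.com/oos/FPL2 | backend/services/squad_service.py | get_formation
-- ===== SOURCE A (Python) =====
-- from typing import List, Dict, Any
--
-- def get_formation(starting_xi: List[Dict[str, Any]]) -> str:
--     """Get formation string from starting XI"""
--     if not starting_xi:
--         return "Unknown"
--
--     # Count players by position
--     gk_count = sum(1 for p in starting_xi if p.get('position') == 'Goalkeeper')
--     def_count = sum(1 for p in starting_xi if p.get('position') == 'Defender')
--     mid_count = sum(1 for p in starting_xi if p.get('position') == 'Midfielder')
--     fwd_count = sum(1 for p in starting_xi if p.get('position') == 'Forward')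
--
--     # Return the standard formation format (excluding goalkeeper)
--     return f"{def_count}-{mid_count}-{fwd_count}"
-- ===== SOURCE B (Python) =====
-- def get_formation(starting_xi):
--     """Get formation string from starting XI (single-pass tally instead of four scans)"""
--     if not starting_xi:
--         return "Unknown"
--
--     counts = {}
--     for p in starting_xi:
--         pos = p.get('position')
--         counts[pos] = counts.get(pos, 0) + 1
--
--     return f"{counts.get('Defender', 0)}-{counts.get('Midfielder', 0)}-{counts.get('Forward', 0)}"
-- ===== Notes on version B (the rewrite author's own statement) =====
-- stated objective: idiomatic
-- what changed: Replaces four separate generator-expression scans of the squad (one per position) with a single pass that builds a position->count table, then formats the Defender/Midfielder/Forward tallies.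
import Mathlib
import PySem

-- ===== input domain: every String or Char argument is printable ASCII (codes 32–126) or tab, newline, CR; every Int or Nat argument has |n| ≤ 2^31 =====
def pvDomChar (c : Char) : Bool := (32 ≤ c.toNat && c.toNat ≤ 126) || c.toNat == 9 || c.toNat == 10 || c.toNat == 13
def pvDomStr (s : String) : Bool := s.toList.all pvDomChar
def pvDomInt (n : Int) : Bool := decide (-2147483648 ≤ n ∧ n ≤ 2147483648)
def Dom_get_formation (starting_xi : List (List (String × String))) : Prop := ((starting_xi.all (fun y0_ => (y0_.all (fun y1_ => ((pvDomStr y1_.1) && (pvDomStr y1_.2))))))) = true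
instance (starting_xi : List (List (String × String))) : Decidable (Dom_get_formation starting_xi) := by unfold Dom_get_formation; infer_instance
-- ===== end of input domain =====

-- B replaces A's four per-position scans with one pass building a position→count table (idiomatic Counter style).


-- ===== PORT A =====
-- sum(1 for p in starting_xi if p.get('position') == pos)
def pvSumIf (starting_xi : List (List (String × String))) (pos : String) : Int :=
  starting_xi.foldl (fun acc p => if (PySem.Dict.ofList p).get? "position" == some pos then acc + 1 else acc) 0

def get_formation (starting_xi : List (List (String × String))) : String :=
  if starting_xi = [] then "Unknown"
  else
    let _gk_count := pvSumIf starting_xi "Goalkeeper"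
    let def_count := pvSumIf starting_xi "Defender"
    let mid_count := pvSumIf starting_xi "Midfielder"
    let fwd_count := pvSumIf starting_xi "Forward"
    PySem.Int.toStr def_count ++ "-" ++ PySem.Int.toStr mid_count ++ "-" ++ PySem.Int.toStr fwd_count

-- ===== PORT B =====
def get_formation_alt (starting_xi : List (List (String × String))) : String :=
  if starting_xi = [] then "Unknown"
  else
    let counts : PySem.Dict (Option String) Int :=
      starting_xi.foldl (fun d p =>
        let pos := (PySem.Dict.ofList p).get? "position"
        d.insert pos (d.getD pos 0 + 1)) PySem.Dict.empty
    PySem.Int.toStr (counts.getD (some "Defender") 0) ++ "-" ++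
    PySem.Int.toStr (counts.getD (some "Midfielder") 0) ++ "-" ++
    PySem.Int.toStr (counts.getD (some "Forward") 0)

-- ===== PRECONDITION & SPEC =====
def Spec_get_formation (starting_xi : List (List (String × String))) (out : String) : Prop := out = get_formation_alt starting_xi
instance (starting_xi : List (List (String × String))) (out : String) : Decidable (Spec_get_formation starting_xi out) := by unfold Spec_get_formation; infer_instance

-- ===== CLAIM (what is proved, stated in full; the proofs are below) =====
def Claim_equal_get_formation : Prop := ∀ (starting_xi : List (List (String × String))), Dom_get_formation starting_xi → Spec_get_formation starting_xi (get_formation starting_xi)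

-- ===== LEMMAS AND PROOFS =====
theorem pvSumIf_aux (starting_xi : List (List (String × String))) (pos : String) (acc : Int) :
    starting_xi.foldl (fun acc p => if (PySem.Dict.ofList p).get? "position" == some pos then acc + 1 else acc) acc
      = acc + ((starting_xi.map (fun p => (PySem.Dict.ofList p).get? "position")).count (some pos) : Int) := by
  induction starting_xi generalizing acc with
  | nil => simp
  | cons p l ih =>
      simp only [List.foldl_cons, ih]
      by_cases h : (PySem.Dict.ofList p).get? "position" = some pos
      · simp [h]; ring
      · simp [h]

theorem pvSumIf_eq_count (starting_xi : List (List (String × String))) (pos : String) :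
    pvSumIf starting_xi pos
      = ((starting_xi.map (fun p => (PySem.Dict.ofList p).get? "position")).count (some pos) : Int) := by
  unfold pvSumIf
  simpa using pvSumIf_aux starting_xi pos 0

theorem counts_getD_eq_count (starting_xi : List (List (String × String))) (pos : String) :
    (starting_xi.foldl (fun d p =>
        let k := (PySem.Dict.ofList p).get? "position"
        d.insert k (d.getD k 0 + 1)) (PySem.Dict.empty : PySem.Dict (Option String) Int)).getD (some pos) 0
      = ((starting_xi.map (fun p => (PySem.Dict.ofList p).get? "position")).count (some pos) : Int) := by
  have h := PySem.Dict.getD_foldl_insert_add_one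
    (l := starting_xi.map (fun p => (PySem.Dict.ofList p).get? "position"))
    (d := (PySem.Dict.empty : PySem.Dict (Option String) Int)) (v := some pos)
  rw [List.foldl_map] at h
  simpa using h

-- ===== VERDICT (by name: the statement is the Claim_ definition above) =====
theorem get_formation_spec : Claim_equal_get_formation := by
  intro xi _
  unfold Spec_get_formation get_formation get_formation_alt
  by_cases h : xi = []
  · simp [h]
  · simp only [h, reduceIte]
    simp only [pvSumIf_eq_count, counts_getD_eq_count]
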